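-- pv_equiv track=rewrite | github.com/eovchinn/ADP-pipeline | pipelines/Farsi/convertParseTreeToLF.py | getEqualArgSets
-- ===== SOURCE A (Python) =====
-- rules={"SBJ":[(1,1)],"OBJ":[(2,1)],"NCL":[(1,1)],"PRD":[(2,0)],"NPOSTMOD":[(1,1)],"NPREMOD":[(1,1)],"ADV":[(0,1)],"POSDEP":[(2,1)],"VPP":[(0,1)],"NPP":[(1,1)],"PARCL":[(1,1)]}
--
-- def getEqualArgSets(propDict,rels):
--     equalArgSets=[]
--     for rel in rels:
--         (relName,dependent,head)=rel
--         if relName not in rules: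
--             continue
--
--         if relName=="ADV":
--             niloo=1
--         if head not in propDict:
--             niloo=1
--         headProp=propDict[head]
--         (headId,headWord,headLemma,headPOS,headArgs)=headProp
--
--         dependentProp=propDict[dependent]
--         (dependentId,dependentWord,dependentLemma,dependentPOS,dependentArgs)=dependentProp
--
--         argUnifications=rules[relName]
--         for argUnification in argUnifications:
--             (headArgIndex,dependentArgIndex)=argUnification
--             if headArgIndex>=len(headArgs) or dependentArgIndex>len(dependentArgs):
--                 #warning
--                 continue
--             headArgName=headArgs[headArgIndex]
--             dependentArgName=dependentArgs[dependentArgIndex]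
--
--             if headArgName=="u2" or dependentArgName=="u2":
--                 niloo=1
--
--             foundSet=None
--             for equalitySet in equalArgSets:
--                 if headArgName in equalitySet or dependentArgName in equalitySet:
--                     foundSet=equalitySet
--                     break
--             if foundSet==None:
--                 foundSet=set()
--                 equalArgSets+=[foundSet]
--             foundSet.add(headArgName)
--             foundSet.add(dependentArgName)
--     return equalArgSets
-- ===== SOURCE B (Python) =====
-- rules={"SBJ":[(1,1)],"OBJ":[(2,1)],"NCL":[(1,1)],"PRD":[(2,0)],"NPOSTMOD":[(1,1)],"NPREMOD":[(1,1)],"ADV":[(0,1)],"POSDEP":[(2,1)],"VPP":[(0,1)],"NPP":[(1,1)],"PARCL":[(1,1)]}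
--
-- def getEqualArgSets(propDict, rels):
--     # Index-based: firstIdx[name] = index of the first equality set containing name,
--     # so A's linear scan over the sets becomes a dict lookup.
--     sets = []
--     firstIdx = {}
--     for relName, dependent, head in rels:
--         if relName not in rules:
--             continue
--         headArgs = propDict[head][4]
--         depArgs = propDict[dependent][4]
--         for hi, di in rules[relName]:
--             if hi >= len(headArgs) or di > len(depArgs):
--                 continue
--             h = headArgs[hi]
--             d = depArgs[di]
--             cands = [j for j in (firstIdx.get(h), firstIdx.get(d)) if j is not None]
--             if cands:
--                 i = min(cands)
--                 sets[i].add(h)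
--                 sets[i].add(d)
--             else:
--                 i = len(sets)
--                 sets.append({h, d})
--             if h not in firstIdx or firstIdx[h] > i:
--                 firstIdx[h] = i
--             if d not in firstIdx or firstIdx[d] > i:
--                 firstIdx[d] = i
--     return sets
-- ===== Notes on version B (the rewrite author's own statement) =====
-- stated objective: alternative
-- what changed: A finds the equality set to extend by linearly scanning all existing sets for each relation; B instead maintains a dict mapping each argument name to the index of the first set containing it and extends the set at the minimum indexed candidate, removing the inner scan.
import Mathlib
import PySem

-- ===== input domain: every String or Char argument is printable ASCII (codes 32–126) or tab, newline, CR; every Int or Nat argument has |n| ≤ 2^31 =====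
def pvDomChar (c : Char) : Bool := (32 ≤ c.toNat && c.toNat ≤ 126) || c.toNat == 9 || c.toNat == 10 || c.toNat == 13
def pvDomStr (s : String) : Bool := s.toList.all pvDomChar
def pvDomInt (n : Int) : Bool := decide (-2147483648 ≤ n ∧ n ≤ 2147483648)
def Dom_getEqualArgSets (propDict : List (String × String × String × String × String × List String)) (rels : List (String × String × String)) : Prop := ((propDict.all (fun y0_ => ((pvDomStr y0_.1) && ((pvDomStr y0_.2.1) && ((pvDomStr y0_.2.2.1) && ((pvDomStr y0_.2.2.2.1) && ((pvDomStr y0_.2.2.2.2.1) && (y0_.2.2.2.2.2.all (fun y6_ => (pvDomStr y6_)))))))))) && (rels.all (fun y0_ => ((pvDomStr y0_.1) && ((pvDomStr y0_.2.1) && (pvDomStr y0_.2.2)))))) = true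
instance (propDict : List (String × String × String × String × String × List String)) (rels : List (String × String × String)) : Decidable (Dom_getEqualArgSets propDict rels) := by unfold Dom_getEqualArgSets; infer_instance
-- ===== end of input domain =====

-- B replaces A's linear scan over the equality sets by a dict mapping each argument
-- name to the index of the first set containing it (a different algorithm of
-- similar measured cost). Equivalence is about the RETURN value.

-- the module constant `rules` (each value is a one-element list of (headArgIndex, dependentArgIndex))
def pvRulesDict : PySem.Dict String (List (Nat × Nat)) :=
  PySem.Dict.ofList [("SBJ", [(1,1)]), ("OBJ", [(2,1)]), ("NCL", [(1,1)]), ("PRD", [(2,0)]),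
    ("NPOSTMOD", [(1,1)]), ("NPREMOD", [(1,1)]), ("ADV", [(0,1)]), ("POSDEP", [(2,1)]),
    ("VPP", [(0,1)]), ("NPP", [(1,1)]), ("PARCL", [(1,1)])]

def pvRules (relName : String) : Option (List (Nat × Nat)) := pvRulesDict.get? relName

-- ===== PORT A =====
-- A's inner scan: find the first equality set containing h or d and add both to it;
-- if none is found, a fresh set {h, d} is appended at the end (Python: equalArgSets+=[foundSet]).
def pvAddToFirst (sets : List (List String)) (h d : String) : List (List String) :=
  match sets with
  | [] => [PySem.Set.add (PySem.Set.add PySem.Set.empty h) d]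
  | s :: rest =>
    if s.contains h || s.contains d then (PySem.Set.add (PySem.Set.add s h) d) :: rest
    else s :: pvAddToFirst rest h d

-- the per-unification step of A's inner loop (guard skips; indices are in range under Pre_, so getD is exact)
def pvUStepA (headArgs dependentArgs : List String) (acc : List (List String)) (u : Nat × Nat) : List (List String) :=
  if headArgs.length ≤ u.1 || dependentArgs.length < u.2 then acc
  else pvAddToFirst acc (headArgs.getD u.1 "") (dependentArgs.getD u.2 "")

-- the body of A's loop over rels (missing propDict keys raise KeyError in Python: excluded by Pre_)
def pvBodyA (pd : PySem.Dict String (String × String × String × String × List String))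
    (equalArgSets : List (List String)) (rel : String × String × String) : List (List String) :=
  match pvRules rel.1 with
  | none => equalArgSets
  | some argUnifications =>
    match pd.get? rel.2.2, pd.get? rel.2.1 with
    | some headProp, some dependentProp =>
      argUnifications.foldl (pvUStepA headProp.2.2.2.2 dependentProp.2.2.2.2) equalArgSets
    | _, _ => equalArgSets

def getEqualArgSets (propDict : List (String × String × String × String × String × List String)) (rels : List (String × String × String)) : List (List String) :=
  rels.foldl (pvBodyA (PySem.Dict.ofList propDict)) []

-- ===== PORT B =====
-- min of two optional indices (B: min over the present candidates)
def pvOptMin : Option Nat → Option Nat → Option Nat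
  | none, b => b
  | some i, none => some i
  | some i, some j => some (min i j)

-- B: `if x not in firstIdx or firstIdx[x] > i: firstIdx[x] = i`
def pvUpdMin (idx : PySem.Dict String Nat) (x : String) (i : Nat) : PySem.Dict String Nat :=
  match idx.get? x with
  | none => idx.insert x i
  | some j => if i < j then idx.insert x i else idx

-- B's per-pair step: look up the first set containing h or d via the index dict
def pvStepB (st : List (List String) × PySem.Dict String Nat) (h d : String) :
    List (List String) × PySem.Dict String Nat :=
  match pvOptMin (st.2.get? h) (st.2.get? d) with
  | some i =>
    (st.1.modify i (fun s => PySem.Set.add (PySem.Set.add s h) d),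
     pvUpdMin (pvUpdMin st.2 h i) d i)
  | none =>
    (st.1 ++ [PySem.Set.add (PySem.Set.add PySem.Set.empty h) d],
     pvUpdMin (pvUpdMin st.2 h st.1.length) d st.1.length)

def pvUStepB (headArgs dependentArgs : List String)
    (st : List (List String) × PySem.Dict String Nat) (u : Nat × Nat) :
    List (List String) × PySem.Dict String Nat :=
  if headArgs.length ≤ u.1 || dependentArgs.length < u.2 then st
  else pvStepB st (headArgs.getD u.1 "") (dependentArgs.getD u.2 "")

def pvBodyB (pd : PySem.Dict String (String × String × String × String × List String))
    (st : List (List String) × PySem.Dict String Nat) (rel : String × String × String) :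
    List (List String) × PySem.Dict String Nat :=
  match pvRules rel.1 with
  | none => st
  | some argUnifications =>
    match pd.get? rel.2.2, pd.get? rel.2.1 with
    | some headProp, some dependentProp =>
      argUnifications.foldl (pvUStepB headProp.2.2.2.2 dependentProp.2.2.2.2) st
    | _, _ => st

def getEqualArgSets_alt (propDict : List (String × String × String × String × String × List String)) (rels : List (String × String × String)) : List (List String) :=
  (rels.foldl (pvBodyB (PySem.Dict.ofList propDict)) ([], PySem.Dict.empty)).1

-- ===== PRECONDITION & SPEC =====
-- Pre_ excludes exactly the inputs on which Python A raises: a rel whose relName is in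
-- rules but whose head or dependent is missing from propDict (KeyError), and a rel whose
-- dependentArgIndex equals len(dependentArgs) while headArgIndex is in range — A's guard
-- tests `>` instead of `>=`, so dependentArgs[dependentArgIndex] raises IndexError there.
def Pre_getEqualArgSets (propDict : List (String × String × String × String × String × List String)) (rels : List (String × String × String)) : Prop :=
  ∀ rel ∈ rels, (pvRules rel.1).isSome = true →
    ((PySem.Dict.ofList propDict).get? rel.2.2).isSome = true ∧
    ((PySem.Dict.ofList propDict).get? rel.2.1).isSome = true ∧
    ∀ u ∈ (pvRules rel.1).getD [],
      ¬(u.1 < (((PySem.Dict.ofList propDict).getD rel.2.2 ("","","","",[])).2.2.2.2).length ∧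
        u.2 = (((PySem.Dict.ofList propDict).getD rel.2.1 ("","","","",[])).2.2.2.2).length)
instance (propDict : List (String × String × String × String × String × List String)) (rels : List (String × String × String)) : Decidable (Pre_getEqualArgSets propDict rels) := by unfold Pre_getEqualArgSets; infer_instance

def pvWitness_getEqualArgSets : (List (String × String × String × String × String × List String)) × (List (String × String × String)) :=
  ([("a", "1", "ali", "ali", "N", ["u0", "u1"]), ("b", "2", "did", "did", "V", ["e1", "u2", "u3"])],
   [("SBJ", "a", "b"), ("XX", "a", "b")])

def Spec_getEqualArgSets (propDict : List (String × String × String × String × String × List String)) (rels : List (String × String × String)) (out : List (List String)) : Prop := out = getEqualArgSets_alt propDict rels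
instance (propDict : List (String × String × String × String × String × List String)) (rels : List (String × String × String)) (out : List (List String)) : Decidable (Spec_getEqualArgSets propDict rels out) := by unfold Spec_getEqualArgSets; infer_instance

-- ===== CLAIM (what is proved, stated in full; the proofs are below) =====
def Claim_equal_getEqualArgSets : Prop := ∀ (propDict : List (String × String × String × String × String × List String)) (rels : List (String × String × String)), Dom_getEqualArgSets propDict rels → Pre_getEqualArgSets propDict rels → Spec_getEqualArgSets propDict rels (getEqualArgSets propDict rels)

-- ===== LEMMAS AND PROOFS =====

-- index of the first equality set containing x
def pvLeast (sets : List (List String)) (x : String) : Option Nat :=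
  sets.findIdx? (fun s => s.contains x)

-- combine an optional old first-index with a new occurrence at i
def pvMinO (o : Option Nat) (i : Nat) : Nat :=
  match o with | none => i | some j => min j i

-- the invariant: the dict gives, for every name, the index of the first set containing it
def pvInv (sets : List (List String)) (idx : PySem.Dict String Nat) : Prop :=
  ∀ x, idx.get? x = pvLeast sets x

theorem pvLeast_cons (s : List String) (rest : List (List String)) (x : String) :
    pvLeast (s :: rest) x = if s.contains x then some 0 else (pvLeast rest x).map (· + 1) :=
  List.findIdx?_cons

theorem pvLeast_lt {sets : List (List String)} {x : String} {i : Nat}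
    (h : pvLeast sets x = some i) : i < sets.length := by
  unfold pvLeast at h
  simp [List.findIdx?_eq_some_iff_findIdx_eq] at h
  omega

theorem pvOptMin_map (a b : Option Nat) :
    pvOptMin (a.map (· + 1)) (b.map (· + 1)) = (pvOptMin a b).map (· + 1) := by
  cases a <;> cases b <;> simp [pvOptMin]

theorem pvOptMin_none {a b : Option Nat} (h : pvOptMin a b = none) :
    a = none ∧ b = none := by
  cases a <;> cases b <;> simp_all [pvOptMin]

theorem pvOptMin_some_lt {a b : Option Nat} {i n : Nat} (h : pvOptMin a b = some i)
    (ha : ∀ j, a = some j → j < n) (hb : ∀ j, b = some j → j < n) : i < n := by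
  cases a <;> cases b <;> simp_all [pvOptMin] <;> omega

theorem contains_addhd_h (s : List String) (h d : String) :
    (PySem.Set.add (PySem.Set.add s h) d).contains h = true := by
  simp [PySem.Set.mem_add]

theorem contains_addhd_d (s : List String) (h d : String) :
    (PySem.Set.add (PySem.Set.add s h) d).contains d = true := by
  simp [PySem.Set.mem_add]

theorem contains_addhd_other (s : List String) (h d x : String) (hx : x ≠ h) (hd : x ≠ d) :
    (PySem.Set.add (PySem.Set.add s h) d).contains x = s.contains x := by
  cases hc : s.contains x
  all_goals simp_all [PySem.Set.mem_add]

theorem pvAddToFirst_eq (sets : List (List String)) (h d : String) :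
    pvAddToFirst sets h d =
      match pvOptMin (pvLeast sets h) (pvLeast sets d) with
      | some i => sets.modify i (fun s => PySem.Set.add (PySem.Set.add s h) d)
      | none => sets ++ [PySem.Set.add (PySem.Set.add PySem.Set.empty h) d] := by
  induction sets with
  | nil => simp [pvAddToFirst, pvLeast, pvOptMin]
  | cons s rest ih =>
    rw [pvAddToFirst, pvLeast_cons, pvLeast_cons]
    cases hh : s.contains h <;> cases hd : s.contains d
    · rw [if_neg (by simp), if_neg Bool.false_ne_true, if_neg Bool.false_ne_true,
        pvOptMin_map, ih]
      cases pvOptMin (pvLeast rest h) (pvLeast rest d)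
      · simp
      · simp [List.modify_succ_cons]
    · rw [if_pos (by simp), if_neg Bool.false_ne_true, if_pos rfl]
      cases pvLeast rest h <;> simp [pvOptMin, List.modify_zero_cons]
    · rw [if_pos (by simp), if_pos rfl, if_neg Bool.false_ne_true]
      cases pvLeast rest d <;> simp [pvOptMin, List.modify_zero_cons]
    · rw [if_pos (by simp), if_pos rfl, if_pos rfl]
      simp [pvOptMin, List.modify_zero_cons]

theorem pvLeast_modify_other (sets : List (List String)) (i : Nat) (x : String)
    (f : List String → List String) (hf : ∀ s, (f s).contains x = s.contains x) :
    pvLeast (sets.modify i f) x = pvLeast sets x := by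
  induction sets generalizing i with
  | nil => simp
  | cons s rest ih =>
    cases i with
    | zero => rw [List.modify_zero_cons, pvLeast_cons, pvLeast_cons, hf s]
    | succ n => rw [List.modify_succ_cons, pvLeast_cons, pvLeast_cons, ih n]

theorem pvLeast_modify_self (sets : List (List String)) (i : Nat) (x : String)
    (f : List String → List String) (hf : ∀ s, (f s).contains x = true)
    (hi : i < sets.length) :
    pvLeast (sets.modify i f) x = some (pvMinO (pvLeast sets x) i) := by
  induction sets generalizing i with
  | nil => simp at hi
  | cons s rest ih =>
    cases i with
    | zero =>
      rw [List.modify_zero_cons, pvLeast_cons, pvLeast_cons, hf s, if_pos rfl]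
      cases hc : s.contains x
      · rw [if_neg Bool.false_ne_true]
        cases pvLeast rest x <;> simp [pvMinO]
      · rw [if_pos rfl]; simp [pvMinO]
    | succ n =>
      rw [List.modify_succ_cons, pvLeast_cons, pvLeast_cons]
      cases hc : s.contains x
      · rw [if_neg Bool.false_ne_true, if_neg Bool.false_ne_true,
          ih n (by simpa using hi)]
        cases pvLeast rest x <;> simp [pvMinO]
      · rw [if_pos rfl, if_pos rfl]; simp [pvMinO]

theorem pvLeast_append_none (sets : List (List String)) (x : String) (t : List String)
    (h0 : pvLeast sets x = none) (ht : t.contains x = true) :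
    pvLeast (sets ++ [t]) x = some sets.length := by
  induction sets with
  | nil => rw [List.nil_append, pvLeast_cons, ht, if_pos rfl]; rfl
  | cons s rest ih =>
    rw [pvLeast_cons] at h0
    cases hc : s.contains x
    · rw [hc, if_neg Bool.false_ne_true] at h0
      rw [List.cons_append, pvLeast_cons, hc, if_neg Bool.false_ne_true,
        ih (Option.map_eq_none_iff.mp h0)]
      rfl
    · rw [hc, if_pos rfl] at h0; exact absurd h0 (by simp)

theorem pvLeast_append_other (sets : List (List String)) (x : String) (t : List String)
    (ht : t.contains x = false) :
    pvLeast (sets ++ [t]) x = pvLeast sets x := by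
  induction sets with
  | nil =>
    rw [List.nil_append, pvLeast_cons, ht, if_neg Bool.false_ne_true]
    rfl
  | cons s rest ih => rw [List.cons_append, pvLeast_cons, pvLeast_cons, ih]

theorem pvUpdMin_get_other (idx : PySem.Dict String Nat) (y : String) (i : Nat)
    (x : String) (hxy : x ≠ y) : (pvUpdMin idx y i).get? x = idx.get? x := by
  cases hj : idx.get? y with
  | none => simp only [pvUpdMin, hj]; exact PySem.Dict.get?_insert_of_ne _ _ hxy
  | some j =>
    simp only [pvUpdMin, hj]
    by_cases hij : i < j
    · rw [if_pos hij]; exact PySem.Dict.get?_insert_of_ne _ _ hxy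
    · rw [if_neg hij]

theorem pvUpdMin_get_self (idx : PySem.Dict String Nat) (y : String) (i : Nat) :
    (pvUpdMin idx y i).get? y = some (pvMinO (idx.get? y) i) := by
  cases hj : idx.get? y with
  | none => simp only [pvUpdMin, hj]; rw [PySem.Dict.get?_insert_self]; rfl
  | some j =>
    simp only [pvUpdMin, hj]
    by_cases hij : i < j
    · rw [if_pos hij, PySem.Dict.get?_insert_self]
      simp only [pvMinO, Option.some.injEq]
      omega
    · rw [if_neg hij, hj]
      simp only [pvMinO, Option.some.injEq]
      omega

theorem pvStepB_fst (st : List (List String) × PySem.Dict String Nat) (h d : String)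
    (hinv : pvInv st.1 st.2) : (pvStepB st h d).1 = pvAddToFirst st.1 h d := by
  rw [pvAddToFirst_eq]
  unfold pvStepB
  rw [hinv h, hinv d]
  cases pvOptMin (pvLeast st.1 h) (pvLeast st.1 d) <;> rfl

theorem pvStepB_inv (st : List (List String) × PySem.Dict String Nat) (h d : String)
    (hinv : pvInv st.1 st.2) : pvInv (pvStepB st h d).1 (pvStepB st h d).2 := by
  unfold pvStepB
  rw [hinv h, hinv d]
  cases e : pvOptMin (pvLeast st.1 h) (pvLeast st.1 d) with
  | none =>
    obtain ⟨eh, ed⟩ := pvOptMin_none e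
    intro x
    by_cases hxd : x = d
    · rw [hxd, pvUpdMin_get_self,
        pvLeast_append_none _ _ _ ed (contains_addhd_d _ _ _)]
      by_cases hdh : d = h
      · rw [hdh, pvUpdMin_get_self, hinv h]
        rw [hdh] at ed
        rw [ed]
        simp [pvMinO]
      · rw [pvUpdMin_get_other _ _ _ _ hdh, hinv d, ed]
        rfl
    · by_cases hxh : x = h
      · rw [hxh, pvUpdMin_get_other _ _ _ _ (hxh ▸ hxd), pvUpdMin_get_self, hinv h, eh,
          pvLeast_append_none _ _ _ eh (contains_addhd_h _ _ _)]
        rfl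
      · rw [pvUpdMin_get_other _ _ _ _ hxd, pvUpdMin_get_other _ _ _ _ hxh, hinv x,
          pvLeast_append_other _ _ _ (by simpa using contains_addhd_other PySem.Set.empty h d x hxh hxd)]
  | some i =>
    have hilt : i < st.1.length :=
      pvOptMin_some_lt e (fun j hj => pvLeast_lt hj) (fun j hj => pvLeast_lt hj)
    intro x
    by_cases hxd : x = d
    · rw [hxd, pvUpdMin_get_self,
        pvLeast_modify_self _ _ _ _ (fun s => contains_addhd_d s _ _) hilt]
      by_cases hdh : d = h
      · rw [hdh, pvUpdMin_get_self, hinv h]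
        cases pvLeast st.1 h <;> simp only [pvMinO, Option.some.injEq] <;> omega
      · rw [pvUpdMin_get_other _ _ _ _ hdh, hinv d]
    · by_cases hxh : x = h
      · rw [hxh, pvUpdMin_get_other _ _ _ _ (hxh ▸ hxd), pvUpdMin_get_self, hinv h,
          pvLeast_modify_self _ _ _ _ (fun s => contains_addhd_h s _ _) hilt]
      · rw [pvUpdMin_get_other _ _ _ _ hxd, pvUpdMin_get_other _ _ _ _ hxh, hinv x,
          pvLeast_modify_other _ _ _ _ (fun s => contains_addhd_other s _ _ _ hxh hxd)]

theorem pvInner (hA dA : List String) (us : List (Nat × Nat)) :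
    ∀ st : List (List String) × PySem.Dict String Nat, pvInv st.1 st.2 →
      (us.foldl (pvUStepB hA dA) st).1 = us.foldl (pvUStepA hA dA) st.1 ∧
      pvInv (us.foldl (pvUStepB hA dA) st).1 (us.foldl (pvUStepB hA dA) st).2 := by
  induction us with
  | nil => intro st hinv; exact ⟨rfl, hinv⟩
  | cons u rest ih =>
    intro st hinv
    simp only [List.foldl_cons]
    by_cases hg : (hA.length ≤ u.1 || dA.length < u.2) = true
    · rw [show pvUStepB hA dA st u = st by unfold pvUStepB; rw [if_pos hg],
        show pvUStepA hA dA st.1 u = st.1 by unfold pvUStepA; rw [if_pos hg]]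
      exact ih st hinv
    · rw [show pvUStepB hA dA st u = pvStepB st (hA.getD u.1 "") (dA.getD u.2 "") by
        unfold pvUStepB; rw [if_neg hg],
        show pvUStepA hA dA st.1 u = pvAddToFirst st.1 (hA.getD u.1 "") (dA.getD u.2 "") by
        unfold pvUStepA; rw [if_neg hg]]
      rw [← pvStepB_fst st _ _ hinv]
      exact ih _ (pvStepB_inv st _ _ hinv)

theorem pvOuter (pd : PySem.Dict String (String × String × String × String × List String))
    (rels : List (String × String × String)) :
    ∀ st : List (List String) × PySem.Dict String Nat, pvInv st.1 st.2 →
      (rels.foldl (pvBodyB pd) st).1 = rels.foldl (pvBodyA pd) st.1 ∧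
      pvInv (rels.foldl (pvBodyB pd) st).1 (rels.foldl (pvBodyB pd) st).2 := by
  induction rels with
  | nil => intro st hinv; exact ⟨rfl, hinv⟩
  | cons rel rest ih =>
    intro st hinv
    simp only [List.foldl_cons]
    cases hr : pvRules rel.1 with
    | none =>
      rw [show pvBodyB pd st rel = st by simp [pvBodyB, hr],
        show pvBodyA pd st.1 rel = st.1 by simp [pvBodyA, hr]]
      exact ih st hinv
    | some us =>
      cases hh : pd.get? rel.2.2 with
      | none =>
        rw [show pvBodyB pd st rel = st by simp [pvBodyB, hr, hh],
          show pvBodyA pd st.1 rel = st.1 by simp [pvBodyA, hr, hh]]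
        exact ih st hinv
      | some hp =>
        cases hd2 : pd.get? rel.2.1 with
        | none =>
          rw [show pvBodyB pd st rel = st by simp [pvBodyB, hr, hh, hd2],
            show pvBodyA pd st.1 rel = st.1 by simp [pvBodyA, hr, hh, hd2]]
          exact ih st hinv
        | some dp =>
          rw [show pvBodyB pd st rel = us.foldl (pvUStepB hp.2.2.2.2 dp.2.2.2.2) st by
              simp [pvBodyB, hr, hh, hd2],
            show pvBodyA pd st.1 rel = us.foldl (pvUStepA hp.2.2.2.2 dp.2.2.2.2) st.1 by
              simp [pvBodyA, hr, hh, hd2]]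
          obtain ⟨h1, h2⟩ := pvInner hp.2.2.2.2 dp.2.2.2.2 us st hinv
          rw [← h1]
          exact ih _ h2

theorem pvInv_init : pvInv [] PySem.Dict.empty := by
  intro x
  simp [pvLeast, PySem.Dict.get?_empty]

-- ===== VERDICT (by name: the statement is the Claim_ definition above) =====
theorem getEqualArgSets_spec : Claim_equal_getEqualArgSets := by
  intro propDict rels _hdom _hpre
  unfold Spec_getEqualArgSets getEqualArgSets getEqualArgSets_alt
  exact ((pvOuter (PySem.Dict.ofList propDict) rels ([], PySem.Dict.empty) pvInv_init).1).symm
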